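-- pv_equiv track=rewrite | github.com/naumovda/python | matrices.py | row_max_series
-- ===== SOURCE A (Python) =====
-- def series_max_len(row):
--     """
--     Return length of max series length
--     Parameters:
--         row: array
--             Input row of matrix
--     Out:
--         list:
--             List of numbers of rows with longest series of identical elements
--     """
--     count = 1
--     max_length = 1
--     for j in range(len(row)-1):
--         if row[j] == row[j+1]:
--             count += 1
--             if count > max_length:
--                 max_length = count
--         else:
--             count = 1
--     return max_length
--
-- def row_max_series(matrix):
--     """
--     Return number of row with longest series of identical elements
--     Parameters:
--         matrix: array
--             Input array
--     Out:
--         list: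
--             List of numbers of rows with longest series of identical elements
--     """
--     idx = 0
--     max_length = series_max_len(matrix[0])
--
--     for i in range(1, len(matrix)):
--         current = series_max_len(matrix[i])
--         if current > max_length:
--             idx = i
--             max_length = current
--     return idx
-- ===== SOURCE B (Python) =====
-- def _run_lengths(row):
--     """Split the row into maximal runs of equal elements; return their lengths."""
--     lengths = []
--     i = 0
--     n = len(row)
--     while i < n:
--         j = i
--         while j < n and row[j] == row[i]:
--             j += 1
--         lengths.append(j - i)
--         i = j
--     return lengths
--
--
-- def row_max_series(matrix):
--     best = [max(_run_lengths(row), default=1) for row in matrix]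
--     return best.index(max(best))
-- ===== Notes on version B (the rewrite author's own statement) =====
-- stated objective: alternative
-- what changed: Per-row maximum run length is computed by explicitly splitting the row into maximal runs and taking the max run length (with default 1), instead of A's incremental adjacent-pair counter over indices, and the outer argmax loop is replaced by max + first-index lookup over the list of per-row values.
-- outside the precondition, e.g. on row_max_series([]): A raises IndexError, B raises ValueError
import Mathlib
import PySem

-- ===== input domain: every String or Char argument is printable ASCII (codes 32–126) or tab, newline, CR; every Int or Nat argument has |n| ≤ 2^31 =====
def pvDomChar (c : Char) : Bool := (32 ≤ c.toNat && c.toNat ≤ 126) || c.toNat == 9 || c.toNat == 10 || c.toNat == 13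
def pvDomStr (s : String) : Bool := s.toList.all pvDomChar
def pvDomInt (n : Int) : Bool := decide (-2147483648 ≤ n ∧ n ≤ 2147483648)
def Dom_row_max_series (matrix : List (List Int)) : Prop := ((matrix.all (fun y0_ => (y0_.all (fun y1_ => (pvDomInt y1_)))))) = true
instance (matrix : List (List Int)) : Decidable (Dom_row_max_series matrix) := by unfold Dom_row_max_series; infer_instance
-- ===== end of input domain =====

-- B replaces A's incremental adjacent-pair counter by an explicit run decomposition
-- (split each row into maximal runs, take the max run length, then first argmax via
-- max + index); objective: alternative/idiomatic, same asymptotic cost.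

-- ===== PORT A =====
def series_max_len (row : List Int) : Int :=
  ((PySem.List.pyRange 0 ((row.length : Int) - 1) 1).foldl
    (fun (st : Int × Int) j =>
      -- row[j], row[j+1]: always in range for j in range(len(row)-1)
      if PySem.List.pyGetD row j 0 = PySem.List.pyGetD row (j + 1) 0 then
        (st.1 + 1, if st.1 + 1 > st.2 then st.1 + 1 else st.2)
      else
        (1, st.2))
    (1, 1)).2

def row_max_series (matrix : List (List Int)) : Int :=
  -- matrix[0] (and matrix[i] for i in range(1, len(matrix))): IndexError only on the
  -- empty matrix, which Pre_ excludes
  ((PySem.List.pyRange 1 (matrix.length : Int) 1).foldl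
    (fun (st : Int × Int) i =>
      let current := series_max_len (PySem.List.pyGetD matrix i [])
      if current > st.2 then (i, current) else st)
    (0, series_max_len (PySem.List.pyGetD matrix 0 []))).1

-- ===== PORT B =====
def runLengths (row : List Int) : List Int :=
  match row with
  | [] => []
  | x :: xs =>
      (((xs.takeWhile (· == x)).length : Int) + 1) :: runLengths (xs.dropWhile (· == x))
termination_by row.length
decreasing_by
  simp only [List.length_cons]
  have := List.length_dropWhile_le (· == x) xs
  omega

def row_max_series_alt (matrix : List (List Int)) : Int :=
  let best := matrix.map (fun row => PySem.List.maxD (runLengths row) (fun y => y) 1)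
  match PySem.List.max? best (fun y => y) with
  | none => 0   -- max([]) raises ValueError: only on the empty matrix, excluded by Pre_
  | some m => (((PySem.List.index? best m).getD 0 : Nat) : Int)

-- ===== PRECONDITION & SPEC =====
-- Pre_ excludes only the empty matrix, on which A raises IndexError (matrix[0]).
def Pre_row_max_series (matrix : List (List Int)) : Prop := matrix ≠ []
instance (matrix : List (List Int)) : Decidable (Pre_row_max_series matrix) := by
  unfold Pre_row_max_series; infer_instance

def pvWitness_row_max_series : List (List Int) := [[1, 1, 2], [3, 3, 3]]

def Spec_row_max_series (matrix : List (List Int)) (out : Int) : Prop := out = row_max_series_alt matrix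
instance (matrix : List (List Int)) (out : Int) : Decidable (Spec_row_max_series matrix out) := by
  unfold Spec_row_max_series; infer_instance

-- ===== CLAIM (what is proved, stated in full; the proofs are below) =====
def Claim_equal_row_max_series : Prop := ∀ (matrix : List (List Int)), Dom_row_max_series matrix → Pre_row_max_series matrix → Spec_row_max_series matrix (row_max_series matrix)

-- ===== LEMMAS AND PROOFS =====

-- A's index loop over range(len(row)-1) reading row[j], row[j+1] is a fold over adjacent pairs.
theorem foldl_range_adj_aux {σ : Type} (xs : List Int) :
    ∀ (x : Int) (g : σ → Int → Int → σ) (init : σ),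
    (List.range xs.length).foldl
      (fun st k => g st ((x :: xs).getD k 0) ((x :: xs).getD (k + 1) 0)) init
    = ((x :: xs).zip xs).foldl (fun st p => g st p.1 p.2) init := by
  induction xs with
  | nil => intro x g init; simp
  | cons y t ih =>
    intro x g init
    rw [List.length_cons, List.range_succ_eq_map, List.zip_cons_cons]
    simp only [List.foldl_cons, List.foldl_map, List.getD_cons_zero, List.getD_cons_succ]
    exact ih y g (g init x y)

theorem foldl_pyRange_adj {σ : Type} (row : List Int) (g : σ → Int → Int → σ) (init : σ) :
    (PySem.List.pyRange 0 ((row.length : Int) - 1) 1).foldl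
      (fun st j => g st (PySem.List.pyGetD row j 0) (PySem.List.pyGetD row (j + 1) 0)) init
    = (row.zip row.tail).foldl (fun st p => g st p.1 p.2) init := by
  cases row with
  | nil => simp [PySem.List.pyRange_one_eq_nil]
  | cons x xs =>
    have h1 : ((((x :: xs).length : Int)) - 1) = (xs.length : Int) := by
      simp
    rw [h1, PySem.List.pyRange_one]
    simp only [Int.sub_zero, Int.toNat_natCast, List.foldl_map]
    have h2 : ∀ (st : σ) (k : Nat),
        g st (PySem.List.pyGetD (x :: xs) (0 + (k : Int)) 0)
             (PySem.List.pyGetD (x :: xs) (0 + (k : Int) + 1) 0)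
      = g st ((x :: xs).getD k 0) ((x :: xs).getD (k + 1) 0) := by
      intro st k
      have e1 : (0 + (k : Int)) = ((k : Nat) : Int) := by omega
      have e2 : ((k : Int) + 1) = ((k + 1 : Nat) : Int) := by push_cast; omega
      rw [e1, e2, PySem.List.pyGetD_natCast, PySem.List.pyGetD_natCast]
    have hc := PySem.List.foldl_congr_mem (l := List.range xs.length) (init := init)
      (f := fun st k => g st (PySem.List.pyGetD (x :: xs) (0 + (k : Int)) 0)
             (PySem.List.pyGetD (x :: xs) (0 + (k : Int) + 1) 0))
      (g := fun st k => g st ((x :: xs).getD k 0) ((x :: xs).getD (k + 1) 0))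
      (fun acc k _ => h2 acc k)
    exact hc.trans (foldl_range_adj_aux xs x g init)

-- The inner loop's (count, max) state across a row, against the run decomposition.
theorem sml_runs (xs : List Int) : ∀ (x c m : Int), 1 ≤ c → c ≤ m →
    (((x :: xs).zip xs).foldl
      (fun (st : Int × Int) p =>
        if p.1 = p.2 then (st.1 + 1, if st.1 + 1 > st.2 then st.1 + 1 else st.2)
        else (1, st.2)) (c, m)).2
    = (runLengths (x :: xs)).tail.foldl max
        (max m (c + ((xs.takeWhile (· == x)).length : Int))) := by
  induction xs with
  | nil =>
    intro x c m h1 hcm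
    simp [runLengths]
    omega
  | cons y t ih =>
    intro x c m h1 hcm
    rw [List.zip_cons_cons, List.foldl_cons]
    by_cases hxy : x = y
    · subst hxy
      simp only [reduceIte]
      have hstep : (if c + 1 > m then c + 1 else m) = max m (c + 1) := by omega
      rw [hstep]
      rw [ih x (c + 1) (max m (c + 1)) (by omega) (le_max_right _ _)]
      have htw : (x :: t).takeWhile (· == x) = x :: t.takeWhile (· == x) := by
        simp
      have hdw : (x :: t).dropWhile (· == x) = t.dropWhile (· == x) := by
        simp
      rw [runLengths, runLengths, htw, hdw]
      simp only [List.tail_cons, List.length_cons]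
      congr 1
      push_cast
      omega
    · have hbeq : (y == x) = false := by
        simp only [beq_eq_false_iff_ne, ne_eq]
        intro h; exact hxy h.symm
      rw [if_neg (by simpa using hxy)]
      rw [ih y 1 m (by omega) (by omega)]
      have htw : (y :: t).takeWhile (· == x) = [] := by
        simp [hbeq]
      have hdw : (y :: t).dropWhile (· == x) = y :: t := by
        simp [hbeq]
      conv_rhs => rw [runLengths, htw, hdw]
      simp only [List.tail_cons, List.length_nil]
      rw [runLengths]
      simp only [List.tail_cons, List.foldl_cons]
      congr 1
      push_cast
      omega

-- max(xs, default=d) on a run-length list: the empty and cons cases of PySem.List.maxD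
theorem maxD_id_nil (d : Int) : PySem.List.maxD ([] : List Int) (fun y => y) d = d := rfl

theorem maxD_id_cons (a : Int) (t : List Int) (d : Int) :
    PySem.List.maxD (a :: t) (fun y => y) d = t.foldl max a := by
  simp [PySem.List.maxD, PySem.List.max?_id_cons]

-- per-row agreement: A's incremental counter equals B's max run length
theorem sml_eq (row : List Int) :
    series_max_len row = PySem.List.maxD (runLengths row) (fun y => y) 1 := by
  cases row with
  | nil =>
    have h1 : series_max_len [] = 1 := by
      unfold series_max_len
      rw [PySem.List.pyRange_one_eq_nil (by simp)]
      rfl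
    rw [h1, runLengths, maxD_id_nil]
  | cons x xs =>
    unfold series_max_len
    rw [foldl_pyRange_adj (x :: xs)
      (fun st u v => if u = v then (st.1 + 1, if st.1 + 1 > st.2 then st.1 + 1 else st.2)
                     else ((1 : Int), st.2)) ((1 : Int), (1 : Int))]
    simp only [List.tail_cons]
    rw [sml_runs xs x 1 1 (by omega) (by omega)]
    rw [runLengths, maxD_id_cons]
    simp only [List.tail_cons]
    congr 1
    omega

-- index loop 'for i in range(a, len(xs))' reading xs[i], as a fold over enumerate
theorem foldl_pyRange_enum {α σ : Type} (xs : List α) (d : α) (g : σ → Int → α → σ) :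
    ∀ (k a : Nat) (init : σ), a + k = xs.length →
    (PySem.List.pyRange (a : Int) (xs.length : Int) 1).foldl
      (fun st i => g st i (PySem.List.pyGetD xs i d)) init
    = (PySem.List.enumerate (xs.drop a) (a : Int)).foldl (fun st p => g st p.1 p.2) init := by
  intro k
  induction k with
  | zero =>
    intro a init h
    have ha : a = xs.length := by omega
    subst ha
    rw [PySem.List.pyRange_one_eq_nil (by omega), List.drop_of_length_le (by omega)]
    simp [PySem.List.enumerate]
  | succ n ih =>
    intro a init h
    have hlt : a < xs.length := by omega
    rw [PySem.List.pyRange_one_cons (by exact_mod_cast hlt), List.foldl_cons]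
    have e1 : ((a : Int) + 1) = ((a + 1 : Nat) : Int) := by push_cast; omega
    rw [e1, ih (a + 1) _ (by omega)]
    rw [List.drop_eq_getElem_cons hlt, PySem.List.enumerate_cons, List.foldl_cons]
    rw [e1]
    congr 2
    rw [PySem.List.pyGetD_natCast, List.getD_eq_getElem?_getD, List.getElem?_eq_getElem hlt]
    rfl

theorem enum_map {α σ : Type} (f : α → Int) (g : σ → Int → Int → σ) :
    ∀ (rs : List α) (s : Int) (init : σ),
    (PySem.List.enumerate rs s).foldl (fun st p => g st p.1 (f p.2)) init
    = (PySem.List.enumerate (rs.map f) s).foldl (fun st p => g st p.1 p.2) init := by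
  intro rs
  induction rs with
  | nil => intro s init; simp [PySem.List.enumerate]
  | cons r t ih =>
    intro s init
    rw [List.map_cons, PySem.List.enumerate_cons, PySem.List.enumerate_cons,
        List.foldl_cons, List.foldl_cons]
    exact ih (s + 1) _

-- the outer loop computes (index of the first maximum, the maximum)
theorem argmax_fold : ∀ (bs : List Int) (s idx m : Int),
    (PySem.List.enumerate bs s).foldl
      (fun (st : Int × Int) p => if p.2 > st.2 then (p.1, p.2) else st) (idx, m)
    = (if bs.foldl max m > m then s + ((List.idxOf (bs.foldl max m) bs : Nat) : Int) else idx,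
       bs.foldl max m) := by
  intro bs
  induction bs with
  | nil => intro s idx m; simp [PySem.List.enumerate]
  | cons b t ih =>
    intro s idx m
    rw [PySem.List.enumerate_cons, List.foldl_cons, List.foldl_cons]
    have hbM := (PySem.List.le_foldl_max t (max m b)).1
    by_cases hb : b > m
    · rw [if_pos (by simpa using hb)]
      have hmb : max m b = b := by omega
      rw [ih (s + 1) s b]
      have hM : t.foldl max b > m := by
        have := (PySem.List.le_foldl_max t b).1; omega
      rw [hmb, if_pos hM]
      by_cases hgt : t.foldl max b > b
      · rw [if_pos hgt]
        have hne : (b == t.foldl max b) = false := by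
          simp only [beq_eq_false_iff_ne, ne_eq]; omega
        rw [List.idxOf_cons, hne]
        simp only [cond_false, Prod.mk.injEq]
        refine ⟨by push_cast; omega, trivial⟩
      · have heq : t.foldl max b = b := by
          have := (PySem.List.le_foldl_max t b).1; omega
        rw [if_neg hgt, heq, List.idxOf_cons_self]
        simp
    · rw [if_neg (by simpa using hb)]
      have hmb : max m b = m := by omega
      rw [ih (s + 1) idx m]
      rw [hmb] at hbM ⊢
      by_cases hM : t.foldl max m > m
      · rw [if_pos hM, if_pos hM]
        have hne : (b == t.foldl max m) = false := by
          simp only [beq_eq_false_iff_ne, ne_eq]; omega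
        rw [List.idxOf_cons, hne]
        simp only [cond_false, Prod.mk.injEq]
        refine ⟨by push_cast; omega, trivial⟩
      · rw [if_neg hM, if_neg hM]

theorem idxOf?_of_mem : ∀ (l : List Int) (a : Int), a ∈ l →
    List.idxOf? a l = some (List.idxOf a l) := by
  intro l
  induction l with
  | nil => intro a h; simp at h
  | cons b t ih =>
    intro a h
    by_cases hba : b = a
    · subst hba; simp [List.idxOf?_cons]
    · have hf : (b == a) = false := by simp [hba]
      rcases List.mem_cons.mp h with h' | h'
      · exact absurd h'.symm hba
      · simp [List.idxOf?_cons, List.idxOf_cons, hf, ih a h']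

-- ===== VERDICT (by name: the statement is the Claim_ definition above) =====
theorem row_max_series_spec : Claim_equal_row_max_series := by
  intro matrix _hdom hpre
  unfold Spec_row_max_series
  cases matrix with
  | nil => exact absurd rfl hpre
  | cons r0 rs =>
    -- A side
    unfold row_max_series
    rw [PySem.List.pyGetD_zero_cons]
    have hlen : ((1 : Nat) : Int) = (1 : Int) := by norm_num
    have hA := foldl_pyRange_enum (r0 :: rs) ([] : List Int)
      (fun (st : Int × Int) i v =>
        if series_max_len v > st.2 then (i, series_max_len v) else st)
      rs.length 1 ((0 : Int), series_max_len r0) (by rw [List.length_cons]; omega)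
    rw [hlen] at hA
    rw [hA]
    simp only [List.drop_one, List.tail_cons]
    rw [enum_map series_max_len
      (fun (st : Int × Int) i v => if v > st.2 then (i, v) else st) rs 1
      ((0 : Int), series_max_len r0)]
    rw [argmax_fold (rs.map series_max_len) 1 0 (series_max_len r0)]
    -- replace A's per-row value by B's
    have hmap : rs.map series_max_len
        = rs.map (fun row => PySem.List.maxD (runLengths row) (fun y => y) 1) :=
      List.map_congr_left (fun r _ => sml_eq r)
    rw [hmap, sml_eq r0]
    set b0 : Int := PySem.List.maxD (runLengths r0) (fun y => y) 1 with hb0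
    set bs : List Int :=
      rs.map (fun row => PySem.List.maxD (runLengths row) (fun y => y) 1) with hbs
    set M : Int := bs.foldl max b0 with hM
    have hb0M : b0 <= M := (PySem.List.le_foldl_max bs b0).1
    have hMmem : M ∈ b0 :: bs := by
      rcases PySem.List.foldl_max_mem bs b0 with h | h
      · rw [hM, h]; exact List.mem_cons_self
      · exact List.mem_cons_of_mem _ h
    -- B side
    have hB : row_max_series_alt (r0 :: rs) = ((List.idxOf M (b0 :: bs) : Nat) : Int) := by
      unfold row_max_series_alt
      simp only [List.map_cons]
      rw [← hb0, ← hbs, PySem.List.max?_id_cons, ← hM]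
      simp only [PySem.List.index?_eq_idxOf?, idxOf?_of_mem _ _ hMmem, Option.getD_some]
    rw [hB]
    by_cases hq : M > b0
    · rw [if_pos hq]
      have hne : (b0 == M) = false := by
        simp only [beq_eq_false_iff_ne, ne_eq]; omega
      rw [List.idxOf_cons, hne]
      simp only [cond_false]
      push_cast; omega
    · rw [if_neg hq]
      have heq : M = b0 := by omega
      rw [heq, List.idxOf_cons_self]
      simp
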